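-- pv_equiv track=rewrite | github.com/HACK-WU/bk-monitor | grafana_migrate/record_grafana_data.py | strip_outer_quotes
-- ===== SOURCE A (Python) =====
-- def strip_outer_quotes(s):
--     """安全移除外层引号"""
--     if not isinstance(s, str):
--         return s
--     s = s.strip()
--
--     while len(s) > 2 and s[0] == s[-1] and s[0] in ('"', "'"):
--         s = s[1:-1]
--         s = s.strip()
--
--     return s
-- ===== SOURCE B (Python) =====
-- def strip_outer_quotes(s):
--     """安全移除外层引号 (two-pointer scan over the original string, no intermediate slice copies)"""
--     if not isinstance(s, str):
--         return s
--     lo, hi = 0, len(s)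
--     while lo < hi and s[lo].isspace():
--         lo += 1
--     while lo < hi and s[hi - 1].isspace():
--         hi -= 1
--     while hi - lo > 2 and s[lo] == s[hi - 1] and s[lo] in ('"', "'"):
--         lo += 1
--         hi -= 1
--         while lo < hi and s[lo].isspace():
--             lo += 1
--         while lo < hi and s[hi - 1].isspace():
--             hi -= 1
--     return s[lo:hi]
-- ===== Notes on version B (the rewrite author's own statement) =====
-- stated objective: alternative
-- what changed: Replaces the peel-one-layer loop that materializes a new stripped slice s[1:-1].strip() each iteration with a single two-pointer scan maintaining lo/hi indices into the original string, slicing once at the end; the copying cost per peeled layer disappears, though typical inputs have too few quote layers for a timing run difference.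
import Mathlib
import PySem

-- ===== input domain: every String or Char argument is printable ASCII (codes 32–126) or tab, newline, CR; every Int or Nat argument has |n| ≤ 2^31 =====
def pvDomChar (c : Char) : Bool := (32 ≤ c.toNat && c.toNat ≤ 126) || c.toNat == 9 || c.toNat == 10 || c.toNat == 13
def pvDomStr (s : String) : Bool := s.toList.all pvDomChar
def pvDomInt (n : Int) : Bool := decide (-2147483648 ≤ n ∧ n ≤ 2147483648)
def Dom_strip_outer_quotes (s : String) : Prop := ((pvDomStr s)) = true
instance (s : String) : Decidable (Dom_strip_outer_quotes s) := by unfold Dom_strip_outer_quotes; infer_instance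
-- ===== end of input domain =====

-- B replaces A's peel-one-layer loop (which re-materializes s[1:-1].strip() each round) with a
-- two-pointer scan keeping lo/hi indices into the original string and slicing once at the end.


-- ===== PORT A =====
-- s[0] in ('"', "'")
def pvIsQuote (c : Char) : Bool := c == '"' || c == '\''

-- the while loop of A; s[1:-1] is (l.drop 1).dropLast, exact since the guard gives len > 2.
-- fuel only makes the loop structural: each pass shrinks the string by ≥ 2 while the guard
-- needs length > 2, so fuel = initial length is never exhausted before the guard fails.
def stripA_go : Nat → List Char → List Char
  | 0, l => l
  | fuel + 1, l =>
    if 2 < l.length ∧ l.head? = l.getLast? ∧ l.head?.any pvIsQuote then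
      stripA_go fuel (PySem.Chars.strip ((l.drop 1).dropLast))
    else l

def strip_outer_quotes (s : String) : String :=
  let t := PySem.Chars.strip s.toList
  String.ofList (stripA_go t.length t)

-- ===== PORT B =====
-- while lo < hi and s[lo].isspace(): lo += 1   (s[lo] in range under the guard, so getD is
-- exact; fuel = hi - lo bounds the iteration count, making the while loop structural)
def pvSkipLo : Nat → List Char → Nat → Nat → Nat
  | 0, _, _, lo => lo
  | fuel + 1, cs, hi, lo =>
    if lo < hi ∧ PySem.Chars.isspace (cs.getD lo ' ') then pvSkipLo fuel cs hi (lo + 1) else lo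

-- while lo < hi and s[hi-1].isspace(): hi -= 1
def pvSkipHi : Nat → List Char → Nat → Nat → Nat
  | 0, _, _, hi => hi
  | fuel + 1, cs, lo, hi =>
    if lo < hi ∧ PySem.Chars.isspace (cs.getD (hi - 1) ' ') then pvSkipHi fuel cs lo (hi - 1) else hi

-- the main while of B (fuel = hi - lo again bounds the iterations)
def pvPeel : Nat → List Char → Nat → Nat → Nat × Nat
  | 0, _, lo, hi => (lo, hi)
  | fuel + 1, cs, lo, hi =>
    if 2 < hi - lo ∧ cs.getD lo ' ' = cs.getD (hi - 1) ' ' ∧ pvIsQuote (cs.getD lo ' ') then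
      let lo1 := pvSkipLo (hi - 1 - (lo + 1)) cs (hi - 1) (lo + 1)
      let hi1 := pvSkipHi (hi - 1 - lo1) cs lo1 (hi - 1)
      pvPeel fuel cs lo1 hi1
    else (lo, hi)

-- s[lo:hi] with 0 ≤ lo ≤ hi ≤ len is exactly (drop lo).take (hi - lo)
def strip_outer_quotes_alt (s : String) : String :=
  let cs := s.toList
  let lo := pvSkipLo cs.length cs cs.length 0
  let hi := pvSkipHi (cs.length - lo) cs lo cs.length
  let p := pvPeel (hi - lo) cs lo hi
  String.ofList ((cs.drop p.1).take (p.2 - p.1))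

-- ===== PRECONDITION & SPEC =====
def Spec_strip_outer_quotes (s : String) (out : String) : Prop := out = strip_outer_quotes_alt s
instance (s : String) (out : String) : Decidable (Spec_strip_outer_quotes s out) := by unfold Spec_strip_outer_quotes; infer_instance

-- ===== CLAIM (what is proved, stated in full; the proofs are below) =====
def Claim_equal_strip_outer_quotes : Prop := ∀ (s : String), Dom_strip_outer_quotes s → Spec_strip_outer_quotes s (strip_outer_quotes s)

-- ===== LEMMAS AND PROOFS =====
-- the segment of cs a (lo,hi) index pair denotes
def pvSeg (cs : List Char) (lo hi : Nat) : List Char := (cs.drop lo).take (hi - lo)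

theorem pvSeg_len (cs : List Char) (lo hi : Nat) (_h1 : lo ≤ hi) (h2 : hi ≤ cs.length) :
    (pvSeg cs lo hi).length = hi - lo := by
  simp [pvSeg, List.length_take, List.length_drop]; omega

theorem pvSeg_cons (cs : List Char) (lo hi : Nat) (h1 : lo < hi) (h2 : hi ≤ cs.length) :
    pvSeg cs lo hi = cs.getD lo ' ' :: pvSeg cs (lo + 1) hi := by
  have hl : lo < cs.length := by omega
  have hn : hi - lo = (hi - (lo + 1)) + 1 := by omega
  rw [pvSeg, List.drop_eq_getElem_cons hl, hn, List.take_succ_cons, pvSeg,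
    List.getD_eq_getElem _ _ hl]

theorem pvSeg_snoc (cs : List Char) (lo hi : Nat) (h1 : lo < hi) (h2 : hi ≤ cs.length) :
    pvSeg cs lo hi = pvSeg cs lo (hi - 1) ++ [cs.getD (hi - 1) ' '] := by
  have hl : hi - 1 < cs.length := by omega
  have hn : hi - lo = (hi - 1 - lo) + 1 := by omega
  simp only [pvSeg, hn, List.take_add_one]
  have : (cs.drop lo)[hi - 1 - lo]? = some cs[hi - 1] := by
    rw [List.getElem?_drop]
    have : lo + (hi - 1 - lo) = hi - 1 := by omega
    rw [this, List.getElem?_eq_getElem hl]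
  rw [this, List.getD_eq_getElem _ _ hl]
  rfl

theorem pvRstrip_concat (xs : List Char) (c : Char) :
    PySem.Chars.rstrip (xs ++ [c]) =
      if PySem.Chars.isspace c then PySem.Chars.rstrip xs else xs ++ [c] := by
  simp [PySem.Chars.rstrip, List.dropWhile_cons]
  split <;> simp

theorem pvSkipLo_spec (fuel : Nat) (cs : List Char) (hi lo : Nat) (hf : hi - lo ≤ fuel)
    (h1 : lo ≤ hi) (h2 : hi ≤ cs.length) :
    lo ≤ pvSkipLo fuel cs hi lo ∧ pvSkipLo fuel cs hi lo ≤ hi ∧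
      pvSeg cs (pvSkipLo fuel cs hi lo) hi = PySem.Chars.lstrip (pvSeg cs lo hi) := by
  induction fuel generalizing lo with
  | zero =>
    have : hi = lo := by omega
    subst this
    simp [pvSkipLo, pvSeg, PySem.Chars.lstrip]
  | succ fuel ih =>
    rw [pvSkipLo]
    split
    · next hg =>
      have hg2 : PySem.Chars.isspace (cs[lo]?.getD ' ') = true := by
        simpa [List.getD] using hg.2
      have h := ih (lo + 1) (by omega) (by omega)
      refine ⟨by omega, h.2.1, ?_⟩
      rw [h.2.2, pvSeg_cons cs lo hi hg.1 h2]
      simp [PySem.Chars.lstrip, List.getD, hg2]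
    · next hg =>
      rcases Nat.lt_or_ge lo hi with hlt | hge
      · have hns : PySem.Chars.isspace (cs[lo]?.getD ' ') = false := by
          by_contra hc
          exact hg ⟨hlt, by simpa [List.getD] using hc⟩
        refine ⟨le_rfl, h1, ?_⟩
        rw [pvSeg_cons cs lo hi hlt h2]
        simp [PySem.Chars.lstrip, List.getD, hns]
      · have : hi - lo = 0 := by omega
        exact ⟨le_rfl, h1, by simp [pvSeg, this, PySem.Chars.lstrip]⟩

theorem pvSkipHi_spec (fuel : Nat) (cs : List Char) (lo hi : Nat) (hf : hi - lo ≤ fuel)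
    (h1 : lo ≤ hi) (h2 : hi ≤ cs.length) :
    lo ≤ pvSkipHi fuel cs lo hi ∧ pvSkipHi fuel cs lo hi ≤ hi ∧
      pvSeg cs lo (pvSkipHi fuel cs lo hi) = PySem.Chars.rstrip (pvSeg cs lo hi) := by
  induction fuel generalizing hi with
  | zero =>
    have : hi = lo := by omega
    subst this
    simp [pvSkipHi, pvSeg, PySem.Chars.rstrip]
  | succ fuel ih =>
    rw [pvSkipHi]
    split
    · next hg =>
      have hg2 : PySem.Chars.isspace (cs[hi - 1]?.getD ' ') = true := by
        simpa [List.getD] using hg.2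
      have h := ih (hi - 1) (by omega) (by omega) (by omega)
      refine ⟨h.1, by omega, ?_⟩
      rw [h.2.2, pvSeg_snoc cs lo hi hg.1 h2, pvRstrip_concat]
      simp [List.getD, hg2]
    · next hg =>
      rcases Nat.lt_or_ge lo hi with hlt | hge
      · have hns : PySem.Chars.isspace (cs[hi - 1]?.getD ' ') = false := by
          by_contra hc
          exact hg ⟨hlt, by simpa [List.getD] using hc⟩
        refine ⟨h1, le_rfl, ?_⟩
        rw [pvSeg_snoc cs lo hi hlt h2, pvRstrip_concat]
        simp [List.getD, hns]
      · have : hi - lo = 0 := by omega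
        exact ⟨h1, le_rfl, by simp [pvSeg, this, PySem.Chars.rstrip]⟩

theorem pvPeel_spec (fuel : Nat) (cs : List Char) (lo hi : Nat) (hf : hi - lo ≤ fuel)
    (h1 : lo ≤ hi) (h2 : hi ≤ cs.length) :
    pvSeg cs (pvPeel fuel cs lo hi).1 (pvPeel fuel cs lo hi).2 =
      stripA_go fuel (pvSeg cs lo hi) := by
  induction fuel generalizing lo hi with
  | zero => simp [pvPeel, stripA_go]
  | succ fuel ih =>
    rw [pvPeel, stripA_go]
    have hlen := pvSeg_len cs lo hi h1 h2
    by_cases hbig : 2 < hi - lo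
    · have hlt : lo < hi := by omega
      have hhead : (pvSeg cs lo hi).head? = some (cs.getD lo ' ') := by
        rw [pvSeg_cons cs lo hi hlt h2]; rfl
      have hlast : (pvSeg cs lo hi).getLast? = some (cs.getD (hi - 1) ' ') := by
        rw [pvSeg_snoc cs lo hi hlt h2]; simp
      have hguard : (2 < hi - lo ∧ cs.getD lo ' ' = cs.getD (hi - 1) ' ' ∧
            pvIsQuote (cs.getD lo ' ')) ↔
          (2 < (pvSeg cs lo hi).length ∧ (pvSeg cs lo hi).head? = (pvSeg cs lo hi).getLast? ∧
            (pvSeg cs lo hi).head?.any pvIsQuote) := by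
        rw [hlen, hhead, hlast]
        simp
      by_cases hguardl : 2 < hi - lo ∧ cs.getD lo ' ' = cs.getD (hi - 1) ' ' ∧
          pvIsQuote (cs.getD lo ' ')
      · rw [if_pos hguardl, if_pos (hguard.mp hguardl)]
        -- inner strip on the segment = the two skips on indices
        have hmid : ((pvSeg cs lo hi).drop 1).dropLast = pvSeg cs (lo + 1) (hi - 1) := by
          rw [pvSeg_cons cs lo hi hlt h2]
          have h1' : lo + 1 < hi := by omega
          rw [pvSeg_snoc cs (lo + 1) hi h1' h2]
          simp
        obtain ⟨hb1a, hb1b, hb1c⟩ := pvSkipLo_spec (hi - 1 - (lo + 1)) cs (hi - 1) (lo + 1)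
          le_rfl (by omega) (by omega)
        obtain ⟨hb2a, hb2b, hb2c⟩ :=
          pvSkipHi_spec (hi - 1 - pvSkipLo (hi - 1 - (lo + 1)) cs (hi - 1) (lo + 1))
          cs (pvSkipLo (hi - 1 - (lo + 1)) cs (hi - 1) (lo + 1)) (hi - 1) le_rfl
          hb1b (by omega)
        have hstrip : PySem.Chars.strip (pvSeg cs (lo + 1) (hi - 1)) =
            pvSeg cs (pvSkipLo (hi - 1 - (lo + 1)) cs (hi - 1) (lo + 1))
              (pvSkipHi (hi - 1 - pvSkipLo (hi - 1 - (lo + 1)) cs (hi - 1) (lo + 1))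
                cs (pvSkipLo (hi - 1 - (lo + 1)) cs (hi - 1) (lo + 1)) (hi - 1)) := by
          rw [PySem.Chars.strip, ← hb1c, ← hb2c]
        rw [hmid, hstrip]
        exact ih _ _ (by omega) hb2a (by omega)
      · rw [if_neg hguardl, if_neg (fun hc => hguardl (hguard.mpr hc))]
    · have hga : ¬ (2 < hi - lo ∧ cs.getD lo ' ' = cs.getD (hi - 1) ' ' ∧
          pvIsQuote (cs.getD lo ' ')) := fun hc => hbig hc.1
      have hgb : ¬ (2 < (pvSeg cs lo hi).length ∧
          (pvSeg cs lo hi).head? = (pvSeg cs lo hi).getLast? ∧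
          (pvSeg cs lo hi).head?.any pvIsQuote) := fun hc => by omega
      rw [if_neg hga, if_neg hgb]

-- ===== VERDICT (by name: the statement is the Claim_ definition above) =====
theorem strip_outer_quotes_spec : Claim_equal_strip_outer_quotes := by
  intro s _
  unfold Spec_strip_outer_quotes
  simp only [strip_outer_quotes, strip_outer_quotes_alt]
  have hfull : pvSeg s.toList 0 s.toList.length = s.toList := by simp [pvSeg]
  obtain ⟨hb1a, hb1b, hb1c⟩ := pvSkipLo_spec s.toList.length s.toList s.toList.length 0
    (by omega) (Nat.zero_le _) le_rfl
  obtain ⟨hb2a, hb2b, hb2c⟩ :=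
    pvSkipHi_spec (s.toList.length - pvSkipLo s.toList.length s.toList s.toList.length 0)
    s.toList (pvSkipLo s.toList.length s.toList s.toList.length 0) s.toList.length le_rfl
    hb1b le_rfl
  rw [hfull] at hb1c
  have hstrip : PySem.Chars.strip s.toList =
      pvSeg s.toList (pvSkipLo s.toList.length s.toList s.toList.length 0)
        (pvSkipHi (s.toList.length - pvSkipLo s.toList.length s.toList s.toList.length 0)
          s.toList (pvSkipLo s.toList.length s.toList s.toList.length 0) s.toList.length) := by
    rw [PySem.Chars.strip, ← hb1c, ← hb2c]
  have hlen := pvSeg_len s.toList (pvSkipLo s.toList.length s.toList s.toList.length 0)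
    (pvSkipHi (s.toList.length - pvSkipLo s.toList.length s.toList s.toList.length 0)
      s.toList (pvSkipLo s.toList.length s.toList s.toList.length 0) s.toList.length)
    hb2a hb2b
  have hp := pvPeel_spec
    (pvSkipHi (s.toList.length - pvSkipLo s.toList.length s.toList s.toList.length 0)
        s.toList (pvSkipLo s.toList.length s.toList s.toList.length 0) s.toList.length -
      pvSkipLo s.toList.length s.toList s.toList.length 0)
    s.toList (pvSkipLo s.toList.length s.toList s.toList.length 0)
    (pvSkipHi (s.toList.length - pvSkipLo s.toList.length s.toList s.toList.length 0)
      s.toList (pvSkipLo s.toList.length s.toList s.toList.length 0) s.toList.length)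
    le_rfl hb2a hb2b
  rw [hstrip, hlen, ← hp]
  rfl
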